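-- pv_equiv track=rewrite | github.com/gasdyueer/toyxyz_manager-zh | src/managers/example.py | _parse_parameters_robust
-- ===== SOURCE A (Python) =====
-- def _parse_parameters_robust(params_str):
--     """
--     Parses the parameter string handling JSON arrays/objects correctly.
--     Returns a dict of lowercased keys -> values.
--     """
--     if not params_str: return {}
--
--     result = {}
--     in_key = True
--
--     # State machine
--     buffer = []
--     stack = [] # For [], {}
--     in_quote = False
--
--     def commit():
--         full_str = "".join(buffer).strip()
--         if not full_str: return
--
--         # Try to find the first colon that is NOT inside quotes/brackets (simple approach)
--         # Actually, standard format is "Key: Value"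
--         if ':' in full_str:
--             k, v = full_str.split(':', 1)
--             result[k.strip().lower()] = v.strip()
--         buffer.clear()
--
--     for char in params_str:
--         if in_quote:
--             buffer.append(char)
--             if char == '"': in_quote = False
--             continue
--
--         if char == '"':
--             in_quote = True
--             buffer.append(char)
--             continue
--
--         if char in "[{":
--             stack.append(char)
--             buffer.append(char)
--             continue
--
--         if char in "]}":
--             if stack: stack.pop()
--             buffer.append(char)
--             continue
--
--         if char == ',' and not stack:
--             # Comma at root level -> Splitter
--             commit()
--             continue
--
--         buffer.append(char)
--
--     commit() # Commit last part
--     return result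
-- ===== SOURCE B (Python) =====
-- def _parse_parameters_robust(params_str):
--     """Split-then-merge rewrite: naively split on every comma, then re-join
--     consecutive pieces whose accumulated quote/bracket state is unbalanced,
--     and finally parse each merged segment as 'key: value'."""
--     # Phase 1: naive split, then merge pieces across non-top-level commas.
--     segments = []
--     pending = []
--     q = False
--     depth = 0
--     for piece in params_str.split(','):
--         pending.append(piece)
--         for ch in piece:
--             if q:
--                 q = ch != '"'
--             elif ch == '"':
--                 q = True
--             elif ch in '[{':
--                 depth += 1
--             elif ch in ']}':
--                 depth = max(depth - 1, 0)
--         if not q and depth == 0: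
--             segments.append(','.join(pending))
--             pending = []
--     if pending:
--         segments.append(','.join(pending))
--     # Phase 2: parse each segment.
--     result = {}
--     for seg in segments:
--         seg = seg.strip()
--         if seg and ':' in seg:
--             k, v = seg.split(':', 1)
--             result[k.strip().lower()] = v.strip()
--     return result
-- ===== Notes on version B (the rewrite author's own statement) =====
-- stated objective: alternative
-- what changed: Replaces A's single-pass character state machine (bracket stack, buffer, inline dict-committing closure) with a split-then-merge algorithm: split naively on every comma with str.split, re-join consecutive pieces while the accumulated quote/bracket balance is open, then parse each merged segment in a separate pass.
import Mathlib
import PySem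

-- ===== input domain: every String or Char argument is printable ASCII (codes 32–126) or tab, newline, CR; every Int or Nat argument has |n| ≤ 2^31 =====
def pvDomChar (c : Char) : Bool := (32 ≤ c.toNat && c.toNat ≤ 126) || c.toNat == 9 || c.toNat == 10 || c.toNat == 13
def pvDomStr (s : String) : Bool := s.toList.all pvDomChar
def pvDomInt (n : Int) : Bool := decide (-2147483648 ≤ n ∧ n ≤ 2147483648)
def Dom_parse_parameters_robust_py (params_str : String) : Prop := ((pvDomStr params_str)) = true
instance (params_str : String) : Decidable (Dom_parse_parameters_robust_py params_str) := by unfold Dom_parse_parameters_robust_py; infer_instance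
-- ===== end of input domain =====

-- B replaces A's single-pass state machine (bracket stack + inline-committing closure) by a
-- split-then-merge algorithm: split naively on every comma, re-join pieces whose accumulated
-- quote/bracket balance is open, then parse each merged segment; objective: alternative.

-- ===== PORT A =====
-- A's `commit` closure: join buffer, strip, skip empties, split at first ':' into the dict.
def pvCommitA (res : PySem.Dict String String) (buf : List Char) : PySem.Dict String String :=
  let full := PySem.Chars.strip buf
  if full.isEmpty then res
  else if PySem.Chars.isIn [':'] full then
    match PySem.Chars.splitOnMax full [':'] 1 with
    | [k, v] => res.insert (String.ofList (PySem.Chars.lower (PySem.Chars.strip k)))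
                           (String.ofList (PySem.Chars.strip v))
    | _ => res
  else res

-- one iteration of A's `for char in params_str` loop; state = (in_quote, stack, buffer, result)
def pvStepA (s : Bool × List Char × List Char × PySem.Dict String String) (c : Char) :
    Bool × List Char × List Char × PySem.Dict String String :=
  let (q, st, buf, res) := s
  if q then (!(c == '"'), st, buf ++ [c], res)
  else if c == '"' then (true, st, buf ++ [c], res)
  else if c == '[' || c == '{' then (q, st ++ [c], buf ++ [c], res)
  else if c == ']' || c == '}' then (q, if st.isEmpty then st else st.dropLast, buf ++ [c], res)
  else if c == ',' && st.isEmpty then (q, st, [], pvCommitA res buf)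
  else (q, st, buf ++ [c], res)

def parse_parameters_robust_py (params_str : String) : List (String × String) :=
  if params_str == "" then []
  else
    let r := params_str.toList.foldl pvStepA (false, [], [], PySem.Dict.empty)
    (pvCommitA r.2.2.2 r.2.2.1).items

-- ===== PORT B =====
-- B's inner loop: update (in_quote, depth) over the characters of one comma-free piece
def pvUpd (s : Bool × Nat) (c : Char) : Bool × Nat :=
  if s.1 then (!(c == '"'), s.2)
  else if c == '"' then (true, s.2)
  else if c == '[' || c == '{' then (s.1, s.2 + 1)
  else if c == ']' || c == '}' then (s.1, s.2 - 1)  -- Nat sub = Python's max(depth-1, 0)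
  else s

-- B's outer loop body: append piece to pending, rescan state, flush when balanced
def pvSegStep (st : Bool × Nat × List (List Char) × List (List Char)) (p : List Char) :
    Bool × Nat × List (List Char) × List (List Char) :=
  let (q, d, pending, segs) := st
  let pending' := pending ++ [p]
  let r := p.foldl pvUpd (q, d)
  if !r.1 && r.2 == 0 then
    (r.1, r.2, ([] : List (List Char)), segs ++ [[','].intercalate pending'])
  else (r.1, r.2, pending', segs)

-- B's phase 2: parse one segment (strip, skip empty, split at first ':') into the dict
def pvParseSeg (res : PySem.Dict String String) (seg : List Char) : PySem.Dict String String :=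
  let s := PySem.Chars.strip seg
  if s.isEmpty then res
  else if PySem.Chars.isIn [':'] s then
    match PySem.Chars.splitOnMax s [':'] 1 with
    | [k, v] => res.insert (String.ofList (PySem.Chars.lower (PySem.Chars.strip k)))
                           (String.ofList (PySem.Chars.strip v))
    | _ => res
  else res

def parse_parameters_robust_py_alt (params_str : String) : List (String × String) :=
  -- params_str.split(',') — ported as List.splitOn on the code points
  let r := (params_str.toList.splitOn ',').foldl pvSegStep (false, 0, [], [])
  let segs := if r.2.2.1.isEmpty then r.2.2.2 else r.2.2.2 ++ [[','].intercalate r.2.2.1]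
  (segs.foldl pvParseSeg PySem.Dict.empty).items

-- ===== PRECONDITION & SPEC =====
def Spec_parse_parameters_robust_py (params_str : String) (out : List (String × String)) : Prop := out = parse_parameters_robust_py_alt params_str
instance (params_str : String) (out : List (String × String)) : Decidable (Spec_parse_parameters_robust_py params_str out) := by unfold Spec_parse_parameters_robust_py; infer_instance

-- ===== CLAIM (what is proved, stated in full; the proofs are below) =====
def Claim_equal_parse_parameters_robust_py : Prop := ∀ (params_str : String), Dom_parse_parameters_robust_py params_str → Spec_parse_parameters_robust_py params_str (parse_parameters_robust_py params_str)

-- ===== LEMMAS AND PROOFS =====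

-- proof-only intermediate machine: A's char loop with the stack abstracted to its length and
-- the dict abstracted to the list of committed buffers; state = (in_quote, depth, buf, segs)
def pvMidStep (s : Bool × Nat × List Char × List (List Char)) (c : Char) :
    Bool × Nat × List Char × List (List Char) :=
  let (q, depth, buf, segs) := s
  if q then (!(c == '"'), depth, buf ++ [c], segs)
  else if c == '"' then (true, depth, buf ++ [c], segs)
  else if c == ',' && depth == 0 then (q, depth, [], segs ++ [buf])
  else
    let d := if c == '[' || c == '{' then depth + 1
             else if c == ']' || c == '}' then depth - 1
             else depth
    (q, d, buf ++ [c], segs)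

theorem pvCommit_eq_parseSeg : pvCommitA = pvParseSeg := rfl

-- A's loop equals the mid machine followed by folding pvParseSeg over the committed segments
theorem pv_loopA (cs : List Char) (q : Bool) (st buf : List Char)
    (segs : List (List Char)) (d : PySem.Dict String String) :
    (fun x => pvCommitA x.2.2.2 x.2.2.1) (cs.foldl pvStepA (q, st, buf, segs.foldl pvParseSeg d))
      = (fun x => (x.2.2.2 ++ [x.2.2.1]).foldl pvParseSeg d)
          (cs.foldl pvMidStep (q, st.length, buf, segs)) := by
  induction cs generalizing q st buf segs with
  | nil =>
      simp [List.foldl_append, pvCommit_eq_parseSeg]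
  | cons c cs ih =>
      simp only [List.foldl_cons]
      by_cases hq : q = true
      · subst hq
        simpa [pvStepA, pvMidStep] using ih (!(c == '"')) st (buf ++ [c]) segs
      · replace hq : q = false := by simpa using hq
        subst hq
        by_cases hquote : c = '"'
        · subst hquote
          simpa [pvStepA, pvMidStep] using ih true st (buf ++ ['"']) segs
        · by_cases hopen : c = '[' ∨ c = '{'
          · have := ih false (st ++ [c]) (buf ++ [c]) segs
            rcases hopen with h | h <;> subst h <;>
              simpa [pvStepA, pvMidStep] using this
          · by_cases hclose : c = ']' ∨ c = '}'
            · have hst : (if st.isEmpty then st else st.dropLast).length = st.length - 1 := by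
                cases st with
                | nil => simp
                | cons a l => simp [List.length_dropLast]
              have := ih false (if st.isEmpty then st else st.dropLast) (buf ++ [c]) segs
              rw [hst] at this
              rcases hclose with h | h <;> subst h <;>
                simpa [pvStepA, pvMidStep] using this
            · by_cases hcomma : c = ','
              · subst hcomma
                by_cases hempty : st = []
                · subst hempty
                  have := ih false [] [] (segs ++ [buf])
                  simp only [List.foldl_append, List.foldl_cons, List.foldl_nil] at this
                  simpa [pvStepA, pvMidStep, pvCommit_eq_parseSeg] using this
                · have hlen : st.length ≠ 0 := by simpa [List.length_eq_zero_iff] using hempty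
                  have := ih false st (buf ++ [',']) segs
                  simpa [pvStepA, pvMidStep, hempty, List.isEmpty_iff, hlen] using this
              · have h1 : ¬ (c = '[' ∨ c = '{') := hopen
                have h2 : ¬ (c = ']' ∨ c = '}') := hclose
                have := ih false st (buf ++ [c]) segs
                simpa [pvStepA, pvMidStep, hquote, hcomma, not_or.mp h1, not_or.mp h2] using this

-- over a comma-free piece the mid machine just appends to buf and updates (q, d) like pvUpd
theorem pv_scan (p : List Char) (hp : ',' ∉ p) (q : Bool) (d : Nat) (buf : List Char)
    (segs : List (List Char)) :
    p.foldl pvMidStep (q, d, buf, segs)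
      = ((p.foldl pvUpd (q, d)).1, (p.foldl pvUpd (q, d)).2, buf ++ p, segs) := by
  induction p generalizing q d buf with
  | nil => simp
  | cons c p ih =>
      have hc : c ≠ ',' := fun h => hp (h ▸ List.mem_cons_self)
      have hp' : ',' ∉ p := fun h => hp (List.mem_cons_of_mem _ h)
      simp only [List.foldl_cons]
      by_cases hq : q = true
      · subst hq
        simpa [pvMidStep, pvUpd] using ih hp' (!(c == '"')) d (buf ++ [c])
      · replace hq : q = false := by simpa using hq
        subst hq
        by_cases hquote : c = '"'
        · subst hquote
          simpa [pvMidStep, pvUpd] using ih hp' true d (buf ++ ['"'])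
        · by_cases hopen : c = '[' ∨ c = '{'
          · have := ih hp' false (d + 1) (buf ++ [c])
            rcases hopen with h | h <;> subst h <;>
              simpa [pvMidStep, pvUpd] using this
          · by_cases hclose : c = ']' ∨ c = '}'
            · have := ih hp' false (d - 1) (buf ++ [c])
              rcases hclose with h | h <;> subst h <;>
                simpa [pvMidStep, pvUpd] using this
            · have h1 : ¬ (c = '[' ∨ c = '{') := hopen
              have h2 : ¬ (c = ']' ∨ c = '}') := hclose
              have := ih hp' false d (buf ++ [c])
              simpa [pvMidStep, pvUpd, hquote, hc, not_or.mp h1, not_or.mp h2] using this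

-- the mid buffer corresponding to B's pending pieces (commas after each pending piece kept)
def pvPendBuf (pending : List (List Char)) : List Char :=
  if pending.isEmpty then [] else [','].intercalate pending ++ [',']

theorem pv_intercalate_cons₂ (a b : List Char) (l : List (List Char)) :
    [','].intercalate (a :: b :: l) = a ++ [','] ++ [','].intercalate (b :: l) := by
  simp [List.intercalate, List.intersperse]

theorem pv_pendBuf_append (pending : List (List Char)) (p : List Char) :
    pvPendBuf pending ++ p = [','].intercalate (pending ++ [p]) := by
  induction pending with
  | nil => simp [pvPendBuf, List.intercalate]
  | cons a l ih =>
      cases l with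
      | nil => simp [pvPendBuf, List.intercalate]
      | cons b l' =>
          have h1 := pv_intercalate_cons₂ a b (l' ++ [p])
          have h2 := pv_intercalate_cons₂ a b l'
          simp only [pvPendBuf, List.isEmpty_cons, List.cons_append] at ih ⊢
          rw [h1, h2]
          simpa [List.append_assoc] using congrArg (a ++ [','] ++ ·) ih

-- main correspondence: mid machine over the comma- rejoined pieces = B's piece machine
theorem pv_segments (ps : List (List Char)) (p : List Char)
    (hp : ',' ∉ p) (hps : ∀ x ∈ ps, ',' ∉ x) (q : Bool) (d : Nat)
    (pending segs : List (List Char)) :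
    (fun x => x.2.2.2 ++ [x.2.2.1])
        (([','].intercalate (p :: ps)).foldl pvMidStep (q, d, pvPendBuf pending, segs))
      = (fun r => if r.2.2.1.isEmpty then r.2.2.2 else r.2.2.2 ++ [[','].intercalate r.2.2.1])
          ((p :: ps).foldl pvSegStep (q, d, pending, segs)) := by
  induction ps generalizing p q d pending segs with
  | nil =>
      rcases hr : p.foldl pvUpd (q, d) with ⟨q1, d1⟩
      have h1 : [','].intercalate [p] = p := by simp [List.intercalate]
      rw [h1]
      simp only [List.foldl_cons, List.foldl_nil, pv_scan p hp, hr, pvSegStep]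
      by_cases hflush : (!q1 && d1 == 0) = true
      · simp [hflush, pv_pendBuf_append]
      · simp [hflush, pv_pendBuf_append]
  | cons p2 ps ih =>
      have hp2 : ',' ∉ p2 := hps p2 (by simp)
      have hps' : ∀ x ∈ ps, ',' ∉ x := fun x hx => hps x (by simp [hx])
      rcases hr : p.foldl pvUpd (q, d) with ⟨q1, d1⟩
      have hbuf : (pvPendBuf pending ++ p) ++ [','] = pvPendBuf (pending ++ [p]) := by
        rw [pv_pendBuf_append]; simp [pvPendBuf]
      rw [pv_intercalate_cons₂, List.foldl_append, List.foldl_append]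
      simp only [pv_scan p hp, hr, List.foldl_cons, List.foldl_nil]
      by_cases hq1 : q1 = true
      · subst hq1
        have hA : pvMidStep (true, d1, pvPendBuf pending ++ p, segs) ','
            = (true, d1, pvPendBuf (pending ++ [p]), segs) := by
          rw [← hbuf]; simp [pvMidStep]
        have hB : pvSegStep (q, d, pending, segs) p
            = (true, d1, pending ++ [p], segs) := by
          simp [pvSegStep, hr]
        have key := ih p2 hp2 hps' true d1 (pending ++ [p]) segs
        simp only [List.foldl_cons] at key
        rw [hA, hB]
        exact key
      · replace hq1 : q1 = false := by simpa using hq1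
        subst hq1
        by_cases hd1 : d1 = 0
        · subst hd1
          have hA : pvMidStep (false, 0, pvPendBuf pending ++ p, segs) ','
              = (false, 0, pvPendBuf [], segs ++ [[','].intercalate (pending ++ [p])]) := by
            rw [← pv_pendBuf_append]
            simp [pvMidStep, pvPendBuf]
          have hB : pvSegStep (q, d, pending, segs) p
              = (false, 0, [], segs ++ [[','].intercalate (pending ++ [p])]) := by
            simp [pvSegStep, hr]
          have key := ih p2 hp2 hps' false 0 [] (segs ++ [[','].intercalate (pending ++ [p])])
          simp only [List.foldl_cons] at key
          rw [hA, hB]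
          exact key
        · have hA : pvMidStep (false, d1, pvPendBuf pending ++ p, segs) ','
              = (false, d1, pvPendBuf (pending ++ [p]), segs) := by
            rw [← hbuf]; simp [pvMidStep, hd1]
          have hB : pvSegStep (q, d, pending, segs) p
              = (false, d1, pending ++ [p], segs) := by
            simp [pvSegStep, hr, hd1]
          have key := ih p2 hp2 hps' false d1 (pending ++ [p]) segs
          simp only [List.foldl_cons] at key
          rw [hA, hB]
          exact key

-- pieces produced by splitOn ',' contain no comma
theorem pv_splitOn_no_comma (xs : List Char) : ∀ p ∈ xs.splitOn ',', ',' ∉ p := by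
  induction xs with
  | nil =>
      intro p hp
      simp only [List.splitOn_nil, List.mem_singleton] at hp
      subst hp; simp
  | cons c xs ih =>
      intro p hp
      simp only [List.splitOn] at hp ih
      rw [List.splitOnP_cons] at hp
      by_cases hc : c = ','
      · simp only [hc, beq_self_eq_true, if_pos, List.mem_cons] at hp
        rcases hp with h | h
        · subst h; simp
        · exact ih p h
      · obtain ⟨h, t, he⟩ := List.exists_cons_of_ne_nil (List.splitOnP_ne_nil (· == ',') xs)
        have hcb : ((c == ',') = true) = False := by simp [hc]
        rw [if_neg (by simp [hc]), he, List.modifyHead_cons] at hp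
        rcases List.mem_cons.mp hp with h1 | h1
        · subst h1
          intro hmem
          rcases List.mem_cons.mp hmem with h2 | h2
          · exact hc h2.symm
          · exact ih h (he ▸ List.mem_cons_self) h2
        · exact ih p (he ▸ List.mem_cons_of_mem _ h1)

-- ===== VERDICT (by name: the statement is the Claim_ definition above) =====
theorem parse_parameters_robust_py_spec : Claim_equal_parse_parameters_robust_py := by
  intro s _
  unfold Spec_parse_parameters_robust_py parse_parameters_robust_py parse_parameters_robust_py_alt
  by_cases hs : s = ""
  · subst hs; decide
  · simp only [beq_iff_eq, hs, if_false]
    obtain ⟨p, ps, he⟩ := List.exists_cons_of_ne_nil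
      (show s.toList.splitOn ',' ≠ [] from List.splitOnP_ne_nil _ _)
    have hnc := pv_splitOn_no_comma s.toList
    have hp : ',' ∉ p := hnc p (he ▸ List.mem_cons_self)
    have hps : ∀ x ∈ ps, ',' ∉ x := fun x hx => hnc x (he ▸ List.mem_cons_of_mem _ hx)
    have hint : [','].intercalate (p :: ps) = s.toList := by
      rw [← he]; exact List.intercalate_splitOn s.toList ','
    have h1 := pv_loopA s.toList false [] [] [] PySem.Dict.empty
    simp only [List.length_nil, List.foldl_nil] at h1
    have hpb : pvPendBuf ([] : List (List Char)) = [] := rfl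
    have h2 := pv_segments ps p hp hps false 0 [] []
    rw [hpb, hint] at h2
    simp only at h2
    rw [he, h1, h2]
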